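-- pv_equiv track=rewrite | github.com/vs228228/ChessProjectOnPython | main.py | findXPos
-- ===== SOURCE A (Python) =====
-- def findXPos(px):
--     x = 0
--     startPX = 27
--     while x < 7:
--         if startPX < px:
--             x += 1
--             if startPX == 82:
--                 startPX += 54
--             else:
--                 startPX += 55
--         else:
--             break
--     return x
-- ===== SOURCE B (Python) =====
-- import bisect
--
-- _THRESHOLDS = [27, 82, 136, 191, 246, 301, 356]
--
-- def findXPos(px):
--     return bisect.bisect_left(_THRESHOLDS, px)
-- ===== Notes on version B (the rewrite author's own statement) =====
-- stated objective: idiomatic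
-- what changed: Replaces the incremental counter/startPX state-machine loop with a precomputed sorted threshold table and a bisect_left binary search counting thresholds strictly below px.
import Mathlib
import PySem

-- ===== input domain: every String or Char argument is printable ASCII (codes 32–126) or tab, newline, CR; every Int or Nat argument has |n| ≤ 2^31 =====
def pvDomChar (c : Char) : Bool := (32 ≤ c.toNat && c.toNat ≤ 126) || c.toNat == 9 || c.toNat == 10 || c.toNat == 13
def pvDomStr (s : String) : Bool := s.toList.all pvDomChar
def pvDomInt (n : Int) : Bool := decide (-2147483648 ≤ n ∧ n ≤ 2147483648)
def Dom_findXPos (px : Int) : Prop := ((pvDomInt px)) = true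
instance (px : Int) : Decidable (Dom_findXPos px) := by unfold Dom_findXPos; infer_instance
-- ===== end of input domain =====

-- B replaces A's counter/startPX state-machine walk by a precomputed sorted threshold
-- table searched with bisect_left (idiomatic; same exact results).

-- ===== PORT A =====
-- the while loop of A, fuel-bounded (the loop increments x each pass, so 7 passes suffice)
def findXPosLoop (px : Int) : Nat → Int → Int → Int
  | 0, x, _ => x
  | fuel + 1, x, startPX =>
    if x < 7 then
      if startPX < px then
        findXPosLoop px fuel (x + 1) (if startPX == 82 then startPX + 54 else startPX + 55)
      else x
    else x

def findXPos (px : Int) : Int := findXPosLoop px 7 0 27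

-- ===== PORT B =====
def pvThresholds : List Int := [27, 82, 136, 191, 246, 301, 356]

-- bisect.bisect_left, transcribed: lo/hi halving loop, fuel-bounded
def pvBisectLeft (a : List Int) (x : Int) : Nat → Nat → Nat → Nat
  | 0, lo, _ => lo
  | fuel + 1, lo, hi =>
    if lo < hi then
      let mid := (lo + hi) / 2
      if a.getD mid 0 < x then pvBisectLeft a x fuel (mid + 1) hi
      else pvBisectLeft a x fuel lo mid
    else lo

def findXPos_alt (px : Int) : Int :=
  (pvBisectLeft pvThresholds px pvThresholds.length 0 pvThresholds.length : Int)

-- ===== PRECONDITION & SPEC =====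
def Spec_findXPos (px : Int) (out : Int) : Prop := out = findXPos_alt px
instance (px : Int) (out : Int) : Decidable (Spec_findXPos px out) := by unfold Spec_findXPos; infer_instance

-- ===== CLAIM (what is proved, stated in full; the proofs are below) =====
def Claim_equal_findXPos : Prop := ∀ (px : Int), Dom_findXPos px → Spec_findXPos px (findXPos px)

-- ===== LEMMAS AND PROOFS =====

-- ===== VERDICT (by name: the statement is the Claim_ definition above) =====
theorem findXPos_spec : Claim_equal_findXPos := by
  intro px _
  unfold Spec_findXPos findXPos findXPos_alt
  simp only [findXPosLoop, pvBisectLeft, pvThresholds, List.length, List.getD, List.getElem?_cons_succ, List.getElem?_cons_zero]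
  norm_num
  split_ifs <;> omega
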